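-- pv_equiv track=rewrite | github.com/crazybass81/T-Developer | backend/src/agents/implementations/parser/user_story_generator.py | _estimate_story_points
-- ===== SOURCE A (Python) =====
-- def _estimate_story_points(feature: str) -> int:
--     """스토리 포인트 추정"""
--     complexity_indicators = {
--         'simple': ['view', 'display', 'show', 'list'],
--         'medium': ['create', 'edit', 'update', 'search'],
--         'complex': ['integrate', 'calculate', 'process', 'analyze'],
--         'very_complex': ['optimize', 'machine learning', 'ai', 'algorithm']
--     }
--
--     feature_lower = feature.lower()
--
--     for complexity, indicators in complexity_indicators.items():
--         if any(indicator in feature_lower for indicator in indicators):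
--             if complexity == 'simple':
--                 return 1
--             elif complexity == 'medium':
--                 return 3
--             elif complexity == 'complex':
--                 return 5
--             else:  # very_complex
--                 return 8
--
--     return 2  # 기본값
-- ===== SOURCE B (Python) =====
-- def _estimate_story_points(feature: str) -> int:
--     """Collect the point values of all matching complexity groups, then take the minimum."""
--     point_groups = [
--         (1, ['view', 'display', 'show', 'list']),
--         (3, ['create', 'edit', 'update', 'search']),
--         (5, ['integrate', 'calculate', 'process', 'analyze']),
--         (8, ['optimize', 'machine learning', 'ai', 'algorithm']),
--     ]
--     feature_lower = feature.lower()
--     matched = [pts for pts, kws in point_groups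
--                if any(kw in feature_lower for kw in kws)]
--     return min(matched) if matched else 2
-- ===== Notes on version B (the rewrite author's own statement) =====
-- stated objective: simpler
-- what changed: Replaces the early-returning priority scan with an if/elif score table by a collect-then-reduce decomposition: map each group directly to its point value, gather the values of all matching groups, and return their minimum (default 2); correct because the original checks groups in ascending point order.
import Mathlib
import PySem

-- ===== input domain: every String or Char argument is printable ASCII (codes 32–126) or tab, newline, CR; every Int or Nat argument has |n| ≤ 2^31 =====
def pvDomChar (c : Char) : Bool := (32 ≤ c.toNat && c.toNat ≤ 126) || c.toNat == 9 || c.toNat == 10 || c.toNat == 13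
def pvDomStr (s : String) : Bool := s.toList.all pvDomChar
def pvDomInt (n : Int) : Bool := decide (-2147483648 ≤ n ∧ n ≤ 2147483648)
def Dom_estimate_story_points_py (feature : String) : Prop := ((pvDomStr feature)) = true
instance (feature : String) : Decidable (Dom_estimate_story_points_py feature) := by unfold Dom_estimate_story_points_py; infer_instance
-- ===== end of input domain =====

-- B: collect-then-reduce — map each complexity group straight to its point value, gather all
-- matching groups' values and return their minimum (default 2), instead of A's early-return
-- priority scan with an if/elif name-to-score table; objective: simpler.


-- ===== PORT A =====
-- A's for-loop over the dict items, first match returns via the if/elif name table.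
def pvLoopA (feature_lower : String) : List (String × List String) → Int
  | [] => 2
  | (complexity, indicators) :: rest =>
    if indicators.any (fun indicator => PySem.Str.isIn indicator feature_lower) then
      if complexity == "simple" then 1
      else if complexity == "medium" then 3
      else if complexity == "complex" then 5
      else 8
    else pvLoopA feature_lower rest

def estimate_story_points_py (feature : String) : Int :=
  let complexity_indicators : List (String × List String) :=
    [("simple", ["view", "display", "show", "list"]),
     ("medium", ["create", "edit", "update", "search"]),
     ("complex", ["integrate", "calculate", "process", "analyze"]),
     ("very_complex", ["optimize", "machine learning", "ai", "algorithm"])]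
  let feature_lower := PySem.Str.lower feature
  pvLoopA feature_lower complexity_indicators

-- ===== PORT B =====
def estimate_story_points_py_alt (feature : String) : Int :=
  let point_groups : List (Int × List String) :=
    [(1, ["view", "display", "show", "list"]),
     (3, ["create", "edit", "update", "search"]),
     (5, ["integrate", "calculate", "process", "analyze"]),
     (8, ["optimize", "machine learning", "ai", "algorithm"])]
  let feature_lower := PySem.Str.lower feature
  let matched :=
    (point_groups.filter
      (fun g => g.2.any (fun kw => PySem.Str.isIn kw feature_lower))).map Prod.fst
  match PySem.List.min? matched (fun x => x) with
  | some m => m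
  | none => 2

-- ===== PRECONDITION & SPEC =====
def Spec_estimate_story_points_py (feature : String) (out : Int) : Prop := out = estimate_story_points_py_alt feature
instance (feature : String) (out : Int) : Decidable (Spec_estimate_story_points_py feature out) := by unfold Spec_estimate_story_points_py; infer_instance

-- ===== CLAIM (what is proved, stated in full; the proofs are below) =====
def Claim_equal_estimate_story_points_py : Prop := ∀ (feature : String), Dom_estimate_story_points_py feature → Spec_estimate_story_points_py feature (estimate_story_points_py feature)

-- ===== LEMMAS AND PROOFS =====

-- Both ports are functions of the four per-group match booleans; case on them.
theorem estimate_story_points_eq (feature : String) :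
    estimate_story_points_py feature = estimate_story_points_py_alt feature := by
  unfold estimate_story_points_py estimate_story_points_py_alt
  set fl := PySem.Str.lower feature with hfl
  by_cases h1 : (["view", "display", "show", "list"].any (fun kw => PySem.Str.isIn kw fl)) = true <;>
  by_cases h2 : (["create", "edit", "update", "search"].any (fun kw => PySem.Str.isIn kw fl)) = true <;>
  by_cases h3 : (["integrate", "calculate", "process", "analyze"].any (fun kw => PySem.Str.isIn kw fl)) = true <;>
  by_cases h4 : (["optimize", "machine learning", "ai", "algorithm"].any (fun kw => PySem.Str.isIn kw fl)) = true <;>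
  simp_all [pvLoopA, PySem.List.min?]

-- ===== VERDICT (by name: the statement is the Claim_ definition above) =====
theorem estimate_story_points_py_spec : Claim_equal_estimate_story_points_py := by
  intro feature _
  exact estimate_story_points_eq feature
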